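-- pv_equiv track=rewrite | github.com/rybolovlevalexey/computer_science_olimpiads | подготовка к егэ/вариант ЕГЭ/06.06 (вар 2).py | eleven
-- ===== SOURCE A (Python) =====
-- d = {10: 'a', 11: 'b', 12: 'c', 13: 'd', 14: 'e', 15: 'f'}
--
-- def eleven(x):
--     res = ''
--     while x > 0:
--         ost = x % 11
--         if ost >= 10:
--             res += d[ost]
--         else:
--             res += str(ost)
--         x //= 11
--     return res[::-1]
-- ===== SOURCE B (Python) =====
-- def eleven(x):
--     if x <= 0:
--         return ''
--     q, r = divmod(x, 11)
--     return eleven(q) + ('a' if r == 10 else str(r))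
-- ===== Notes on version B (the rewrite author's own statement) =====
-- stated objective: simpler
-- what changed: Iterative digit-collection loop with a final [::-1] replaced by a recursive function that emits digits most-significant-first via the call stack, so no reversal or accumulator is needed.
import Mathlib
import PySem

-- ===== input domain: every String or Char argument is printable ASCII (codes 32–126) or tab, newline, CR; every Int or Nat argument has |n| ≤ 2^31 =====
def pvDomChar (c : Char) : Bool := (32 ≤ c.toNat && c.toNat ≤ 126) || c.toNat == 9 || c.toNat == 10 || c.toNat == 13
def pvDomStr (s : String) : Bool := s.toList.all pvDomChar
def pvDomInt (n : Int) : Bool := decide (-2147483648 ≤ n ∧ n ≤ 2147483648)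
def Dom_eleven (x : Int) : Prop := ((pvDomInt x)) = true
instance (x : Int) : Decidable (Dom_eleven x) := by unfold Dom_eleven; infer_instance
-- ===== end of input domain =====

-- B replaces A's iterative loop (append digits least-significant-first, then reverse with [::-1])
-- by a recursion that emits digits most-significant-first; same return value, no mutation involved.

-- ===== PORT A =====
-- the module-level dict d
def pvDictA : PySem.Dict Int String :=
  PySem.Dict.ofList [((10:Int), "a"), (11, "b"), (12, "c"), (13, "d"), (14, "e"), (15, "f")]

theorem pv_fdiv_lt (x : Int) (h : 0 < x) : (PySem.Int.floordiv x 11).toNat < x.toNat := by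
  rw [PySem.Int.floordiv_eq_ediv_of_pos (by omega)]
  omega

-- the while loop of A, state = (x, res); d[ost] ported as get?.getD "" (the key 10, the only
-- reachable one, is always present, so the default is never used); res[::-1] likewise
def elevenLoop (x : Int) (res : String) : String :=
  if h : x > 0 then
    elevenLoop (PySem.Int.floordiv x 11)
      (res ++ (if PySem.Int.mod x 11 ≥ 10
               then (PySem.Dict.get? pvDictA (PySem.Int.mod x 11)).getD ""
               else PySem.Int.toStr (PySem.Int.mod x 11)))
  else
    (PySem.Str.slice? res none none (-1)).getD ""
termination_by x.toNat
decreasing_by exact pv_fdiv_lt x h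

def eleven (x : Int) : String := elevenLoop x ""

-- ===== PORT B =====
def eleven_alt (x : Int) : String :=
  if _h : x ≤ 0 then ""
  else
    eleven_alt (PySem.Int.floordiv x 11)
      ++ (if PySem.Int.mod x 11 = 10 then "a" else PySem.Int.toStr (PySem.Int.mod x 11))
termination_by x.toNat
decreasing_by exact pv_fdiv_lt x (by omega)

-- ===== PRECONDITION & SPEC =====
def Spec_eleven (x : Int) (out : String) : Prop := out = eleven_alt x
instance (x : Int) (out : String) : Decidable (Spec_eleven x out) := by unfold Spec_eleven; infer_instance

-- ===== CLAIM (what is proved, stated in full; the proofs are below) =====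
def Claim_equal_eleven : Prop := ∀ (x : Int), Dom_eleven x → Spec_eleven x (eleven x)

-- ===== LEMMAS AND PROOFS =====

-- the digit strings of both versions coincide for any remainder mod 11
theorem pv_digit_eq (r : Int) (h0 : 0 ≤ r) (h1 : r < 11) :
    (if r ≥ 10 then (PySem.Dict.get? pvDictA r).getD "" else PySem.Int.toStr r)
      = (if r = 10 then "a" else PySem.Int.toStr r) := by
  interval_cases r <;> simp [pvDictA, PySem.Dict.ofList, PySem.Dict.get?, PySem.Dict.update, PySem.Dict.empty, PySem.Dict.insert, PySem.Dict.contains]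

-- each digit string is a single character, so reversing its character list is the identity
theorem pv_digit_palin (r : Int) (h0 : 0 ≤ r) (h1 : r < 11) :
    ((if r = 10 then "a" else PySem.Int.toStr r) : String).toList.reverse
      = ((if r = 10 then "a" else PySem.Int.toStr r) : String).toList := by
  interval_cases r <;> simp [PySem.Int.toList_toStr] <;> decide

-- loop invariant: the loop computes B's result followed by the reverse of the accumulator
theorem pv_loop_eq (x : Int) (res : String) :
    elevenLoop x res = eleven_alt x ++ String.ofList res.toList.reverse := by
  induction x, res using elevenLoop.induct with
  | case1 x res h ih =>
    have hm0 : 0 ≤ PySem.Int.mod x 11 := PySem.Int.mod_nonneg x (by omega : (0:Int) < 11)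
    have hm1 : PySem.Int.mod x 11 < 11 := PySem.Int.mod_lt x (by omega : (0:Int) < 11)
    have hdig := pv_digit_eq _ hm0 hm1
    rw [elevenLoop, dif_pos h, hdig, eleven_alt]
    simp only [dite_eq_ite] at ih
    rw [hdig] at ih
    simp only [show ¬ x ≤ 0 by omega, dite_false]
    rw [ih]
    generalize hd : (if PySem.Int.mod x 11 = 10 then "a" else PySem.Int.toStr (PySem.Int.mod x 11)) = dg
    have hp : dg.toList.reverse = dg.toList := by rw [← hd]; exact pv_digit_palin _ hm0 hm1
    rw [String.toList_append, List.reverse_append, hp, String.ofList_append,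
        String.ofList_toList, String.append_assoc]
  | case2 x res h =>
    rw [elevenLoop]
    simp only [h, dite_false]
    rw [eleven_alt]
    simp only [show x ≤ 0 by omega, dite_true]
    rw [PySem.Str.slice?_none_none_neg_one, Option.getD_some, String.empty_append]

-- ===== VERDICT (by name: the statement is the Claim_ definition above) =====
theorem eleven_spec : Claim_equal_eleven := by
  intro x _
  unfold Spec_eleven eleven
  rw [pv_loop_eq]
  simp
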